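-- pv_equiv track=rewrite | github.com/Itaxo01/Competitive-Programming | codeforces/global27/b.py | find_min_number
-- ===== SOURCE A (Python) =====
-- def find_min_number(n):
--     dp = [ [None]*11 for _ in range(n+1) ]  # dp[pos][mod11] = minimal number as string
--     dp[0][0] = ''
--     digits = ['3','6']
--
--     for pos in range(1, n+1):
--         for d in range(11):
--             if dp[pos-1][d] is not None:
--                 for x in digits:
--                     if pos == n and x != '6':
--                         continue  # Last digit must be '6'
--                     if pos % 2 == 1:  # odd position
--                         new_d = (d + int(x)) % 11
--                     else:
--                         new_d = (d - int(x) + 11) %11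
--                     potential_num = dp[pos -1][d] + x
--                     if dp[pos][new_d] is None or potential_num < dp[pos][new_d]:
--                         dp[pos][new_d] = potential_num
--
--     if dp[n][0]:
--         return dp[n][0]
--     else:
--         return "-1"
-- ===== SOURCE B (Python) =====
-- def find_min_number(n):
--     if n < 2 or n == 3:
--         return "-1"
--     if n % 2 == 0:
--         return "3" * (n - 2) + "66"
--     return "3" * (n - 5) + "36366"
-- ===== Notes on version B (the rewrite author's own statement) =====
-- stated objective: faster
-- what changed: Replaces the O(n^2) string-DP over (position, value mod 11) by the closed-form minimal answer: '-1' for n<2 or n=3, '3'*(n-2)+'66' for even n, '3'*(n-5)+'36366' for odd n>=5.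
import Mathlib
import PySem

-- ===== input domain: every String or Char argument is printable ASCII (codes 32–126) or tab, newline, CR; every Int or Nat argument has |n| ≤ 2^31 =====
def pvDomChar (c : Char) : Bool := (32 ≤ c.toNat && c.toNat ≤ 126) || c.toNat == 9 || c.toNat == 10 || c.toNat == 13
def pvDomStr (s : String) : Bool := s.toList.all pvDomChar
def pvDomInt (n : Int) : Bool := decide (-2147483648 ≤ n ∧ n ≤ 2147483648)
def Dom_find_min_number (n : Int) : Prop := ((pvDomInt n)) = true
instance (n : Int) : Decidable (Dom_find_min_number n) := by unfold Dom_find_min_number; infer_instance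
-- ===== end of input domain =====

-- B replaces A's O(n^2) string-DP with the closed-form minimal answer (measured asymptotically faster).


-- ===== PORT A =====
-- strings are carried as List Char (PySem convention); Python's str '<' is '<' on List Char
def pvDigitsA : List (List Char) := [['3'], ['6']]

-- 'if dp[pos][new_d] is None or potential_num < dp[pos][new_d]: dp[pos][new_d] = potential_num'
def pvUpdate (row : List (Option (List Char))) (nd : Int) (pot : List Char) :
    List (Option (List Char)) :=
  match PySem.List.pyGetD row nd none with
  | none => row.set nd.toNat (some pot)
  | some cur => if pot < cur then row.set nd.toNat (some pot) else row

-- the body of 'for pos in …': builds dp[pos] from dp[pos-1] (the only row the Python reads)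
def pvStepRow (prev : List (Option (List Char))) (pos n : Int) :
    List (Option (List Char)) :=
  (PySem.List.pyRange 0 11 1).foldl (fun acc d =>
    match PySem.List.pyGetD prev d none with
    | none => acc
    | some s =>
      pvDigitsA.foldl (fun acc2 x =>
        if pos = n ∧ x ≠ ['6'] then acc2
        else
          let xv := (PySem.Int.ofChars? x).getD 0
          let nd := if PySem.Int.mod pos 2 = 1 then PySem.Int.mod (d + xv) 11
                    else PySem.Int.mod (d - xv + 11) 11
          pvUpdate acc2 nd (s ++ x)) acc)
    (List.replicate 11 none)

def find_min_number (n : Int) : String :=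
  let init := (List.replicate 11 (none : Option (List Char))).set 0 (some [])
  let final := (PySem.List.pyRange 1 (n + 1) 1).foldl (fun prev pos => pvStepRow prev pos n) init
  match PySem.List.pyGetD final 0 none with
  | some s => if s ≠ [] then String.ofList s else "-1"
  | none => "-1"

-- ===== PORT B =====
def find_min_number_alt (n : Int) : String :=
  if n < 2 ∨ n = 3 then "-1"
  else if PySem.Int.mod n 2 = 0 then
    String.ofList (PySem.List.pyRepeat ['3'] (n - 2) ++ ['6', '6'])
  else
    String.ofList (PySem.List.pyRepeat ['3'] (n - 5) ++ ['3', '6', '3', '6', '6'])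

-- ===== PRECONDITION & SPEC =====
-- Pre_ excludes exactly n < 0, where the Python A raises IndexError (dp[0][0] on an empty dp).
def Pre_find_min_number (n : Int) : Prop := 0 ≤ n
instance (n : Int) : Decidable (Pre_find_min_number n) := by unfold Pre_find_min_number; infer_instance
def pvWitness_find_min_number : Int := 6

def Spec_find_min_number (n : Int) (out : String) : Prop := out = find_min_number_alt n
instance (n : Int) (out : String) : Decidable (Spec_find_min_number n out) := by unfold Spec_find_min_number; infer_instance

-- ===== CLAIM (what is proved, stated in full; the proofs are below) =====
def Claim_equal_find_min_number : Prop := ∀ (n : Int), Dom_find_min_number n → Pre_find_min_number n → Spec_find_min_number n (find_min_number n)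

-- ===== LEMMAS AND PROOFS =====

-- pvStepRow with the two data-independent tests ('pos odd?' / 'pos == n?') resolved to Booleans
def pvStepCore (o l : Bool) (prev : List (Option (List Char))) :
    List (Option (List Char)) :=
  (PySem.List.pyRange 0 11 1).foldl (fun acc d =>
    match PySem.List.pyGetD prev d none with
    | none => acc
    | some s =>
      pvDigitsA.foldl (fun acc2 x =>
        if l = true ∧ x ≠ ['6'] then acc2
        else
          let xv := (PySem.Int.ofChars? x).getD 0
          let nd := if o = true then PySem.Int.mod (d + xv) 11
                    else PySem.Int.mod (d - xv + 11) 11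
          pvUpdate acc2 nd (s ++ x)) acc)
    (List.replicate 11 none)

lemma pvStepRow_eq (prev : List (Option (List Char))) (pos n : Int) :
    pvStepRow prev pos n
      = pvStepCore (decide (PySem.Int.mod pos 2 = 1)) (decide (pos = n)) prev := by
  simp only [pvStepRow, pvStepCore, decide_eq_true_eq]

-- prepend a common prefix to every DP cell
def pvMapRow (p : List Char) (row : List (Option (List Char))) :
    List (Option (List Char)) :=
  row.map (Option.map (p ++ ·))

lemma pvMapRow_nil (row : List (Option (List Char))) : pvMapRow [] row = row := by
  simp [pvMapRow]

lemma pvMapRow_comp (p q : List Char) (row : List (Option (List Char))) :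
    pvMapRow p (pvMapRow q row) = pvMapRow (p ++ q) row := by
  simp [pvMapRow, List.map_map, Option.map_map, Function.comp_def, List.append_assoc]

lemma pvLt_append_left (p s t : List Char) : p ++ s < p ++ t ↔ s < t := by
  induction p with
  | nil => simp
  | cons a p ih => simpa [List.cons_lt_cons_self] using ih

lemma pvGetD_mapRow (p : List Char) (row : List (Option (List Char))) (d : Int) :
    PySem.List.pyGetD (pvMapRow p row) d none
      = Option.map (p ++ ·) (PySem.List.pyGetD row d none) := by
  simpa [pvMapRow] using PySem.List.pyGetD_map (Option.map (p ++ ·)) row d none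

lemma pvUpdate_map (p : List Char) (row : List (Option (List Char))) (nd : Int) (pot : List Char) :
    pvUpdate (pvMapRow p row) nd (p ++ pot) = pvMapRow p (pvUpdate row nd pot) := by
  unfold pvUpdate
  rw [pvGetD_mapRow]
  cases h : PySem.List.pyGetD row nd none with
  | none => simp [pvMapRow, List.map_set]
  | some cur =>
    simp only [Option.map_some]
    by_cases hlt : pot < cur
    · rw [if_pos ((pvLt_append_left p pot cur).mpr hlt), if_pos hlt]
      simp [pvMapRow, List.map_set]
    · rw [if_neg (fun hc => hlt ((pvLt_append_left p pot cur).mp hc)), if_neg hlt]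

lemma pvStepCore_map (o l : Bool) (p : List Char) (row : List (Option (List Char))) :
    pvStepCore o l (pvMapRow p row) = pvMapRow p (pvStepCore o l row) := by
  unfold pvStepCore
  rw [show (List.replicate 11 (none : Option (List Char)))
        = pvMapRow p (List.replicate 11 none) by simp [pvMapRow]]
  refine List.foldl_hom (pvMapRow p) ?_
  intro acc d
  rw [pvGetD_mapRow]
  cases h : PySem.List.pyGetD row d none with
  | none => rfl
  | some s =>
    simp only [Option.map_some, pvDigitsA, List.foldl_cons, List.foldl_nil]
    have hup : ∀ (acc : List (Option (List Char))) (nd : Int) (t : List Char),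
        pvUpdate (pvMapRow p acc) nd (p ++ s ++ t) = pvMapRow p (pvUpdate acc nd (s ++ t)) := by
      intro acc nd t
      rw [List.append_assoc, pvUpdate_map]
    split_ifs <;> simp only [hup]

-- the DP rows once they have stabilised (pos = 10 / pos = 11)
def pvRow10 : List (Option (List Char)) := [
  some ['3', '3', '3', '3', '3', '3', '3', '3', '3', '3'],
  some ['3', '3', '6', '3', '6', '3', '6', '3', '6', '3'],
  some ['3', '3', '3', '3', '3', '6', '3', '6', '3', '6'],
  some ['3', '3', '3', '3', '3', '3', '3', '3', '6', '3'],
  some ['6', '3', '6', '3', '6', '3', '6', '3', '6', '3'],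
  some ['3', '3', '3', '3', '3', '3', '3', '6', '3', '6'],
  some ['3', '3', '3', '3', '3', '3', '6', '3', '6', '3'],
  some ['3', '6', '3', '6', '3', '6', '3', '6', '3', '6'],
  some ['3', '3', '3', '3', '3', '3', '3', '3', '3', '6'],
  some ['3', '3', '3', '3', '6', '3', '6', '3', '6', '3'],
  some ['3', '3', '3', '6', '3', '6', '3', '6', '3', '6']]
def pvRow11 : List (Option (List Char)) := [
  some ['3', '3', '3', '3', '3', '3', '3', '3', '3', '6', '3'],
  some ['3', '3', '3', '3', '3', '3', '6', '3', '6', '3', '6'],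
  some ['3', '3', '3', '6', '3', '6', '3', '6', '3', '6', '3'],
  some ['3', '3', '3', '3', '3', '3', '3', '3', '3', '3', '3'],
  some ['3', '3', '3', '3', '6', '3', '6', '3', '6', '3', '6'],
  some ['3', '3', '3', '3', '3', '6', '3', '6', '3', '6', '3'],
  some ['3', '3', '3', '3', '3', '3', '3', '3', '3', '3', '6'],
  some ['3', '3', '6', '3', '6', '3', '6', '3', '6', '3', '6'],
  some ['3', '3', '3', '3', '3', '3', '3', '6', '3', '6', '3'],
  some ['3', '3', '3', '3', '3', '3', '3', '3', '6', '3', '6'],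
  some ['3', '6', '3', '6', '3', '6', '3', '6', '3', '6', '3']]

-- the unconstrained DP rows, iterated from dp[0]
def pvIter : Nat → List (Option (List Char))
  | 0 => (List.replicate 11 (none : Option (List Char))).set 0 (some [])
  | m + 1 => pvStepCore (decide ((m + 1) % 2 = 1)) false (pvIter m)

-- concrete kernel computations
set_option maxRecDepth 20000 in
lemma pvIter10 : pvIter 10 = pvRow10 := by decide
set_option maxRecDepth 20000 in
lemma pvStepOdd : pvStepCore true false pvRow10 = pvRow11 := by decide
set_option maxRecDepth 20000 in
lemma pvStepEven : pvStepCore false false pvRow11 = pvMapRow ['3', '3'] pvRow10 := by decide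
set_option maxRecDepth 20000 in
lemma pvFinalEven :
    PySem.List.pyGetD (pvStepCore false true pvRow11) 0 none
      = some (List.replicate 10 '3' ++ ['6', '6']) := by decide
set_option maxRecDepth 20000 in
lemma pvFinalOdd :
    PySem.List.pyGetD (pvStepCore true true pvRow10) 0 none
      = some (List.replicate 6 '3' ++ ['3', '6', '3', '6', '6']) := by decide

lemma pvIter_stable (k : Nat) :
    pvIter (10 + k)
      = if k % 2 = 0 then pvMapRow (List.replicate k '3') pvRow10
        else pvMapRow (List.replicate (k - 1) '3') pvRow11 := by
  induction k with
  | zero => simpa [pvMapRow_nil] using pvIter10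
  | succ k ih =>
    have step : pvIter (10 + (k + 1))
        = pvStepCore (decide ((10 + k + 1) % 2 = 1)) false (pvIter (10 + k)) := rfl
    rcases Nat.even_or_odd k with he | ho
    · have hk : k % 2 = 0 := Nat.even_iff.mp he
      have hflag : (decide ((10 + k + 1) % 2 = 1)) = true := by
        simp only [decide_eq_true_eq]; omega
      rw [step, hflag, ih, if_pos hk, pvStepCore_map, pvStepOdd, if_neg (by omega)]
      simp
    · have hk : k % 2 = 1 := Nat.odd_iff.mp ho
      have hflag : (decide ((10 + k + 1) % 2 = 1)) = false := by
        simp only [decide_eq_false_iff_not]; omega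
      rw [step, hflag, ih, if_neg (by omega), pvStepCore_map, pvStepEven,
          pvMapRow_comp, show (['3', '3'] : List Char) = List.replicate 2 '3' from rfl,
          ← List.replicate_add, if_pos (by omega : (k + 1) % 2 = 0)]
      have : k - 1 + 2 = k + 1 := by omega
      rw [this]

-- the main loop of A, after m iterations
def pvLoop (n : Int) (m : Nat) : List (Option (List Char)) :=
  (PySem.List.pyRange 1 ((m : Int) + 1) 1).foldl (fun prev pos => pvStepRow prev pos n)
    ((List.replicate 11 (none : Option (List Char))).set 0 (some []))

lemma pvLoop_succ (n : Int) (m : Nat) :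
    pvLoop n (m + 1) = pvStepRow (pvLoop n m) ((m : Int) + 1) n := by
  unfold pvLoop
  rw [show ((m + 1 : Nat) : Int) + 1 = (((m : Int) + 1) + 1) by push_cast; ring,
      PySem.List.pyRange_one_succ_right (by omega), List.foldl_append]
  rfl

lemma pvLoop_eq_iter (n : Int) (m : Nat) (hlt : (m : Int) < n) :
    pvLoop n m = pvIter m := by
  induction m with
  | zero =>
    unfold pvLoop pvIter
    rw [show ((0 : Nat) : Int) + 1 = 1 by norm_num, PySem.List.pyRange_one_eq_nil (by omega)]
    rfl
  | succ m ih =>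
    rw [pvLoop_succ, ih (by push_cast at hlt ⊢; omega), pvStepRow_eq, pvIter]
    congr 1
    · apply decide_eq_decide.mpr
      rw [PySem.Int.mod_eq_emod_of_pos (by omega)]
      omega
    · simp only [decide_eq_false_iff_not]
      push_cast at hlt
      omega

lemma pvLoop_stable (n : Int) (m : Nat) (h10 : 10 ≤ m) (hlt : (m : Int) < n) :
    pvLoop n m
      = if m % 2 = 0 then pvMapRow (List.replicate (m - 10) '3') pvRow10
        else pvMapRow (List.replicate (m - 11) '3') pvRow11 := by
  obtain ⟨k, hk⟩ : ∃ k, m = 10 + k := ⟨m - 10, by omega⟩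
  subst hk
  rw [pvLoop_eq_iter _ _ hlt, pvIter_stable]
  have e1 : 10 + k - 10 = k := by omega
  have e2 : 10 + k - 11 = k - 1 := by omega
  have e3 : (10 + k) % 2 = k % 2 := by omega
  rw [e1, e2, e3]

lemma pvFind_eq_loop (n : Int) (h : 0 ≤ n) :
    find_min_number n
      = match PySem.List.pyGetD (pvLoop n n.toNat) 0 none with
        | some s => if s ≠ [] then String.ofList s else "-1"
        | none => "-1" := by
  unfold find_min_number pvLoop
  rw [Int.toNat_of_nonneg h]

-- B's branch shape for large n
lemma pvAlt_large (n : Int) (h : 13 ≤ n) :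
    find_min_number_alt n
      = if PySem.Int.mod n 2 = 0 then
          String.ofList (List.replicate (n - 2).toNat '3' ++ ['6', '6'])
        else
          String.ofList (List.replicate (n - 5).toNat '3' ++ ['3', '6', '3', '6', '6']) := by
  unfold find_min_number_alt
  rw [if_neg (by omega), PySem.List.pyRepeat_singleton, PySem.List.pyRepeat_singleton]

-- ===== VERDICT (by name: the statement is the Claim_ definition above) =====
set_option maxRecDepth 100000 in
theorem find_min_number_spec : Claim_equal_find_min_number := by
  unfold Claim_equal_find_min_number Spec_find_min_number Pre_find_min_number
  intro n _ hn
  by_cases hle : n ≤ 12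
  · interval_cases n <;> decide
  · -- n ≥ 13: the stabilised closed form
    have h13 : 13 ≤ n := by omega
    have hmod : PySem.Int.mod n 2 = n % 2 := PySem.Int.mod_eq_emod_of_pos (by omega)
    have hm : n.toNat = (n.toNat - 1) + 1 := by omega
    set m := n.toNat - 1 with hmdef
    have hmc : ((m : Int)) = n - 1 := by omega
    have hm10 : 10 ≤ m := by omega
    have hmlt : (m : Int) < n := by omega
    rw [pvFind_eq_loop n (by omega), hm, pvLoop_succ, pvLoop_stable n m hm10 hmlt,
        show (m : Int) + 1 = n by omega, pvStepRow_eq, decide_eq_true (rfl : n = n)]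
    by_cases hpar : n % 2 = 0
    · -- n even, m odd
      have hmo : m % 2 = 1 := by omega
      rw [if_neg (by omega), show (decide (PySem.Int.mod n 2 = 1)) = false by
            simp only [hmod, decide_eq_false_iff_not]; omega,
          pvStepCore_map, pvGetD_mapRow, pvFinalEven]
      simp only [Option.map_some]
      rw [← List.append_assoc, ← List.replicate_add,
          show m - 11 + 10 = (n - 2).toNat by omega]
      simp [pvAlt_large n h13]
      intro h
      omega
    · -- n odd, m even
      have hme : m % 2 = 0 := by omega
      rw [if_pos hme, show (decide (PySem.Int.mod n 2 = 1)) = true by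
            simp only [hmod]; simp only [decide_eq_true_eq]; omega,
          pvStepCore_map, pvGetD_mapRow, pvFinalOdd]
      simp only [Option.map_some]
      rw [← List.append_assoc, ← List.replicate_add,
          show m - 10 + 6 = (n - 5).toNat by omega]
      simp [pvAlt_large n h13]
      intro h
      omega
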